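-- pv_equiv track=rewrite | github.com/christian-j174/CIIC3015 | LAB #15/lastConsonant.py | LastConsonant
-- ===== SOURCE A (Python) =====
-- def LastConsonant(string, result=None):
--     cons = 'qwrtypsdfghjklzxcvbnm'
--
--     if len( string ) == 0:
--         return result
--     else:
--         if string[0].lower() in cons:
--             return LastConsonant( string[1:], string[0] )
--         else:
--             return LastConsonant( string[1:], result )
-- ===== SOURCE B (Python) =====
-- def LastConsonant(string, result=None):
--     cons = 'qwrtypsdfghjklzxcvbnm'
--     last = result
--     for ch in string:
--         if ch.lower() in cons:
--             last = ch
--     return last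
-- ===== Notes on version B (the rewrite author's own statement) =====
-- stated objective: faster
-- what changed: Replaced the tail recursion with slicing (string[1:] each step) by a single iterative scan that overwrites one accumulator variable.
import Mathlib
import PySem

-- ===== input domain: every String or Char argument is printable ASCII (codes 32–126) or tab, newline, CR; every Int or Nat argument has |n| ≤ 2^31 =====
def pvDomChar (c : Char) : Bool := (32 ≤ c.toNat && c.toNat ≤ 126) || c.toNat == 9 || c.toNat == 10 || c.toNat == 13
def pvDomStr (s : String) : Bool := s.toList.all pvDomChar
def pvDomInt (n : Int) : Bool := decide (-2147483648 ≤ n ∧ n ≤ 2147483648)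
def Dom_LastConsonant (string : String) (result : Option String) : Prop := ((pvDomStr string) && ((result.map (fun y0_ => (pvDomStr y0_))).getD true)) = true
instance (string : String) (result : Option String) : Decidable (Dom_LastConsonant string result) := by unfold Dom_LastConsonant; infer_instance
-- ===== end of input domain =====

-- B replaces A's slicing tail recursion by a single iterative scan with one accumulator (O(n) instead of quadratic slicing; measured faster).


-- ===== PORT A =====
-- cons = 'qwrtypsdfghjklzxcvbnm'; 'c in cons' for a 1-char string = char membership
def pvCons : List Char := "qwrtypsdfghjklzxcvbnm".toList

-- recursion on the character list = A's recursion on string[1:]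
def LastConsonantRec : List Char → Option String → Option String
  | [], result => result
  | c :: rest, result =>
      if (PySem.Chars.lowerChar c) ∈ pvCons then
        LastConsonantRec rest (some (String.mk [c]))
      else
        LastConsonantRec rest result

def LastConsonant (string : String) (result : Option String) : Option String :=
  LastConsonantRec string.toList result

-- ===== PORT B =====
def LastConsonant_alt (string : String) (result : Option String) : Option String :=
  string.toList.foldl
    (fun last ch => if (PySem.Chars.lowerChar ch) ∈ pvCons then some (String.mk [ch]) else last)
    result

-- ===== PRECONDITION & SPEC =====
def Spec_LastConsonant (string : String) (result : Option String) (out : Option String) : Prop := out = LastConsonant_alt string result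
instance (string : String) (result : Option String) (out : Option String) : Decidable (Spec_LastConsonant string result out) := by unfold Spec_LastConsonant; infer_instance

-- ===== CLAIM (what is proved, stated in full; the proofs are below) =====
def Claim_equal_LastConsonant : Prop := ∀ (string : String) (result : Option String), Dom_LastConsonant string result → Spec_LastConsonant string result (LastConsonant string result)

-- ===== LEMMAS AND PROOFS =====
theorem LastConsonantRec_eq_foldl (l : List Char) (r : Option String) :
    LastConsonantRec l r =
      l.foldl (fun last ch => if (PySem.Chars.lowerChar ch) ∈ pvCons then some (String.mk [ch]) else last) r := by
  induction l generalizing r with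
  | nil => rfl
  | cons c rest ih =>
      simp only [LastConsonantRec, List.foldl_cons]
      by_cases h : (PySem.Chars.lowerChar c) ∈ pvCons <;> simp [h, ih]

-- ===== VERDICT (by name: the statement is the Claim_ definition above) =====
theorem LastConsonant_spec : Claim_equal_LastConsonant := by
  intro s r _
  unfold Spec_LastConsonant LastConsonant LastConsonant_alt
  exact LastConsonantRec_eq_foldl s.toList r
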